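-- pv_equiv track=rewrite | github.com/nahgil2614/cryptopals | set4/SHA_1.py | leftrotate
-- ===== SOURCE A (Python) =====
-- mask = 0xffffffff
--
-- def big_endian_64_bit( num ):
--     num = hex(num).replace('0x','').rjust(16,'0')
--     return bytes([int(num[i:i+2], 16) for i in range(0, len(num), 2)])
--
-- def leftrot( num ):
--     return ((num << 1) & mask) + (num >> 31)
--
-- def bytes2int( block ):
--     return sum([block[len(block)-1-i] * (256**i) for i in range(len(block))])
--
-- def leftrotate(num, offset):
--     num_type = type(num)
--     if num_type == bytes:
--         num = bytes2int(num)
--     for i in range(offset):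
--         num = leftrot(num)
--     if num_type == bytes:
--         num = big_endian_64_bit( num )[4:]
--     return num
-- ===== SOURCE B (Python) =====
-- def leftrotate(num, offset):
--     # O(1) closed-form 32-bit left rotate instead of `offset` single-bit rotations.
--     if offset <= 0:
--         return num
--     w = num % 4294967296
--     k = offset % 32
--     return (w * (1 << k) + w // (1 << (32 - k))) % 4294967296
-- ===== Notes on version B (the rewrite author's own statement) =====
-- stated objective: faster
-- what changed: B replaces A's loop of `offset` single-bit rotations with the O(1) closed-form 32-bit rotate (num mod 2^32 shifted by offset mod 32).
-- intended difference: On negative num with offset >= 1 A's Python arithmetic right shift feeds a negative carry into the rotation and returns a mangled value (leftrotate(-1,1) = 4294967293); B returns the intended 32-bit left rotation of num mod 2^32 (4294967295 there). — e.g. on leftrotate(-1, 1): A returns 4294967293, B returns 4294967295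
import Mathlib
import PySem

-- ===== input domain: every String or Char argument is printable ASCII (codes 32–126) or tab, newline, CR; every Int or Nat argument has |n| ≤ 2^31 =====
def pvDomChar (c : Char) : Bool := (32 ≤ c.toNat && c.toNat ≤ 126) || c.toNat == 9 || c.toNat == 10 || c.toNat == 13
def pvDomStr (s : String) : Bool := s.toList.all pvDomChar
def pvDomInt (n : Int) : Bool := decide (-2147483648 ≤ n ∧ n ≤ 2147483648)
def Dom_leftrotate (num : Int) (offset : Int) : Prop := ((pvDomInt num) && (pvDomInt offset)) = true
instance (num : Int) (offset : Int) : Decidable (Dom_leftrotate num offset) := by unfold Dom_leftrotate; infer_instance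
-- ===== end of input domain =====

-- B replaces A's loop of `offset` single-bit rotations by the O(1) closed-form 32-bit
-- rotate of num mod 2^32; on negative num with offset ≥ 1 the two differ (see D_ below).

-- ===== PORT A =====
-- module constant `mask = 0xffffffff`
def pvMask : Int := 4294967295

-- helper `leftrot`: ((num << 1) & mask) + (num >> 31); Python's <<, >> on int are
-- Lean's <<<, >>> and & is PySem.Int.band (exact on negatives).
def leftrot (num : Int) : Int :=
  PySem.Int.band (num <<< (1 : Nat)) pvMask + (num >>> (31 : Nat))

-- `num` is an int here (the bytes branch of the Python is never taken for int input).
def leftrotate (num : Int) (offset : Int) : Int :=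
  (PySem.List.pyRange 0 offset 1).foldl (fun n _ => leftrot n) num

-- ===== PORT B =====
def leftrotate_alt (num : Int) (offset : Int) : Int :=
  if offset ≤ 0 then num
  else
    let w := PySem.Int.mod num 4294967296
    let k := PySem.Int.mod offset 32
    -- k ≥ 0 and 32 - k ≥ 0 always (Python % with positive divisor), so .toNat is exact
    PySem.Int.mod (w * ((1 : Int) <<< k.toNat) + PySem.Int.floordiv w ((1 : Int) <<< (32 - k).toNat)) 4294967296

-- ===== PRECONDITION & SPEC =====
-- On negative num with offset ≥ 1, A's Python arithmetic right shift feeds a negative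
-- carry into the rotation and returns a mangled value (e.g. leftrotate(-1,1) = 4294967293);
-- B returns the intended 32-bit left rotation of num mod 2^32 (4294967295 there).
def D_leftrotate (num : Int) (offset : Int) : Prop := num < 0 ∧ 1 ≤ offset
instance (num : Int) (offset : Int) : Decidable (D_leftrotate num offset) := by unfold D_leftrotate; infer_instance

def Spec_leftrotate (num : Int) (offset : Int) (out : Int) : Prop :=
  ¬ D_leftrotate num offset → out = leftrotate_alt num offset
instance (num : Int) (offset : Int) (out : Int) : Decidable (Spec_leftrotate num offset out) := by unfold Spec_leftrotate; infer_instance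

def pvDiffWitness_leftrotate : Int × Int := (-1, 1)
def pvDiffWitnessOut_leftrotate : Int × Int := (4294967293, 4294967295)

-- ===== CLAIM (what is proved, stated in full; the proofs are below) =====
def Claim_unchanged_leftrotate : Prop := ∀ (num : Int) (offset : Int), Dom_leftrotate num offset → Spec_leftrotate num offset (leftrotate num offset)
def Claim_changed_leftrotate : Prop := Dom_leftrotate (pvDiffWitness_leftrotate.1) (pvDiffWitness_leftrotate.2) ∧ D_leftrotate (pvDiffWitness_leftrotate.1) (pvDiffWitness_leftrotate.2) ∧ leftrotate (pvDiffWitness_leftrotate.1) (pvDiffWitness_leftrotate.2) = pvDiffWitnessOut_leftrotate.1 ∧ leftrotate_alt (pvDiffWitness_leftrotate.1) (pvDiffWitness_leftrotate.2) = pvDiffWitnessOut_leftrotate.2 ∧ pvDiffWitnessOut_leftrotate.1 ≠ pvDiffWitnessOut_leftrotate.2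

-- ===== LEMMAS AND PROOFS =====

-- the rotation state after k single-bit steps, in closed form (for 0 ≤ m < 2^32)
def pvF (k : Nat) (m : Int) : Int := (m * 2 ^ k) % 4294967296 + (m * 2 ^ k) / 4294967296

lemma leftrot_eq (n : Int) (h : 0 ≤ n) :
    leftrot n = 2 * n % 4294967296 + n / 2147483648 := by
  have hs : n <<< (1 : Nat) = 2 * n := by rw [Int.shiftLeft_eq]; ring
  have hr : n >>> (31 : Nat) = n / 2147483648 := by rw [Int.shiftRight_eq_div_pow]; norm_num
  unfold leftrot pvMask
  rw [hs, hr, PySem.Int.band_of_nonneg (by omega) (by norm_num)]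
  have hmask := Nat.and_two_pow_sub_one_eq_mod (2 * n).toNat 32
  norm_num at hmask
  rw [show ((4294967295 : Int).toNat) = 4294967295 by decide, hmask]
  omega

lemma pvF_nonneg (k : Nat) (m : Int) (h0 : 0 ≤ m) : 0 ≤ pvF k m := by
  unfold pvF
  have h1 := Int.emod_nonneg (m * 2 ^ k) (by norm_num : (4294967296 : Int) ≠ 0)
  have h2 := Int.ediv_nonneg (by positivity : (0 : Int) ≤ m * 2 ^ k) (by norm_num : (0:Int) ≤ 4294967296)
  omega

lemma pvF_eq (k : Nat) (hk : k ≤ 32) (m : Int) (h0 : 0 ≤ m) :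
    pvF k m = (m % 2 ^ (32 - k)) * 2 ^ k + m / 2 ^ (32 - k) := by
  unfold pvF
  have hPQ : (2 : Int) ^ k * 2 ^ (32 - k) = 4294967296 := by
    rw [← pow_add, show k + (32 - k) = 32 by omega]; norm_num
  have hP : (0 : Int) < 2 ^ k := by positivity
  have hQ : (0 : Int) < 2 ^ (32 - k) := by positivity
  have hd := Int.mul_ediv_add_emod m (2 ^ (32 - k))
  have hr0 : 0 ≤ m % 2 ^ (32 - k) := Int.emod_nonneg m (by omega)
  have hrQ : m % 2 ^ (32 - k) < 2 ^ (32 - k) := Int.emod_lt_of_pos m hQ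
  have hq0 : 0 ≤ m / 2 ^ (32 - k) := Int.ediv_nonneg h0 (by omega)
  have hb0 : 0 ≤ m % 2 ^ (32 - k) * 2 ^ k := mul_nonneg hr0 (le_of_lt hP)
  have hbM : m % 2 ^ (32 - k) * 2 ^ k < 4294967296 := by nlinarith
  have ht : m % 2 ^ (32 - k) * 2 ^ k + 4294967296 * (m / 2 ^ (32 - k)) = m * 2 ^ k := by
    rw [← hPQ]; linear_combination (2 : Int) ^ k * hd
  have hu := (Int.ediv_emod_unique (a := m * 2 ^ k) (b := 4294967296)
    (r := m % 2 ^ (32 - k) * 2 ^ k) (q := m / 2 ^ (32 - k))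
    (by norm_num : (0:Int) < 4294967296)).mpr ⟨ht, hb0, hbM⟩
  rw [hu.1, hu.2]

-- one single-bit rotation step, stated on the closed form, with 2^k, 2^(31-k) abstracted
lemma rot_step_arith (P Q' m : Int) (hP : 0 < P) (hQ' : 0 < Q')
    (hPQ : P * Q' = 2147483648) (h0 : 0 ≤ m) (h1 : m < 4294967296) :
    2 * (m % (2 * Q') * P + m / (2 * Q')) % 4294967296 +
      (m % (2 * Q') * P + m / (2 * Q')) / 2147483648
    = m % Q' * (2 * P) + m / Q' := by
  have hq0 : 0 ≤ m / (2 * Q') := Int.ediv_nonneg h0 (by omega)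
  have hqP : m / (2 * Q') < P := by
    rw [Int.ediv_lt_iff_lt_mul (by omega : (0:Int) < 2 * Q')]; nlinarith
  have hr0 : 0 ≤ m % (2 * Q') := Int.emod_nonneg m (by omega)
  have hrlt : m % (2 * Q') < 2 * Q' := Int.emod_lt_of_pos m (by omega)
  have hu0 : 0 ≤ m % (2 * Q') % Q' := Int.emod_nonneg _ (by omega)
  have hult : m % (2 * Q') % Q' < Q' := Int.emod_lt_of_pos _ hQ'
  have hs0 : 0 ≤ m % (2 * Q') / Q' := Int.ediv_nonneg hr0 (by omega)
  have hs2 : m % (2 * Q') / Q' < 2 := by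
    rw [Int.ediv_lt_iff_lt_mul hQ']; omega
  set q := m / (2 * Q') with hq
  set s := m % (2 * Q') / Q' with hs
  set u := m % (2 * Q') % Q' with hu
  have hrsu : m % (2 * Q') = s * Q' + u := by
    have := Int.mul_ediv_add_emod (m % (2 * Q')) Q'
    linarith
  have hmdec : m = (2 * q + s) * Q' + u := by
    have := Int.mul_ediv_add_emod m (2 * Q')
    linarith
  have hmq : m / Q' = 2 * q + s ∧ m % Q' = u :=
    (Int.ediv_emod_unique hQ').mpr ⟨by linarith, hu0, hult⟩
  have hw0 : 0 ≤ u * P + q := by nlinarith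
  have hwlt : u * P + q < 2147483648 := by nlinarith
  have hx : m % (2 * Q') * P + m / (2 * Q') = 2147483648 * s + (u * P + q) := by
    rw [hrsu, ← hPQ]; ring
  have hdiv : (m % (2 * Q') * P + m / (2 * Q')) / 2147483648 = s := by
    rw [hx]
    exact ((Int.ediv_emod_unique (a := 2147483648 * s + (u * P + q)) (b := 2147483648)
      (r := u * P + q) (q := s) (by norm_num : (0:Int) < 2147483648)).mpr
      ⟨by ring, hw0, hwlt⟩).1
  have hmod : 2 * (m % (2 * Q') * P + m / (2 * Q')) % 4294967296 = 2 * (u * P + q) := by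
    rw [show 2 * (m % (2 * Q') * P + m / (2 * Q')) = 4294967296 * s + 2 * (u * P + q) by
          rw [hx]; ring]
    exact ((Int.ediv_emod_unique (a := 4294967296 * s + 2 * (u * P + q)) (b := 4294967296)
      (r := 2 * (u * P + q)) (q := s) (by norm_num : (0:Int) < 4294967296)).mpr
      ⟨by ring, by omega, by omega⟩).2
  rw [hmod, hdiv, hmq.1, hmq.2]; ring

lemma pvF_step (k : Nat) (hk : k < 32) (m : Int) (h0 : 0 ≤ m) (h1 : m < 4294967296) :
    leftrot (pvF k m) = pvF (k + 1) m := by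
  rw [leftrot_eq _ (pvF_nonneg k m h0), pvF_eq k (by omega) m h0,
      pvF_eq (k + 1) (by omega) m h0]
  rw [show (2:Int) ^ (32 - k) = 2 * 2 ^ (31 - k) by
        rw [show 32 - k = (31 - k) + 1 by omega, pow_succ]; ring,
      show 32 - (k + 1) = 31 - k by omega,
      show (2:Int) ^ (k + 1) = 2 * 2 ^ k by rw [pow_succ]; ring]
  exact rot_step_arith (2 ^ k) (2 ^ (31 - k)) m (by positivity) (by positivity)
    (by rw [← pow_add, show k + (31 - k) = 31 by omega]; norm_num) h0 h1

lemma pvF_iter (j : Nat) (m : Int) (h0 : 0 ≤ m) (h1 : m < 4294967296) :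
    leftrot^[j] m = pvF (j % 32) m := by
  induction j with
  | zero =>
    simp only [Function.iterate_zero, id_eq, Nat.zero_mod]
    unfold pvF; norm_num; omega
  | succ j ih =>
    rw [Function.iterate_succ_apply', ih,
        pvF_step (j % 32) (Nat.mod_lt _ (by norm_num)) m h0 h1]
    by_cases h : j % 32 = 31
    · rw [h, show (j + 1) % 32 = 0 by omega]
      unfold pvF; norm_num; omega
    · rw [show (j + 1) % 32 = j % 32 + 1 by omega]

lemma pvB_closed (k : Nat) (hk : k < 32) (m : Int) (h0 : 0 ≤ m) (h1 : m < 4294967296) :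
    (m * 2 ^ k + m / 2 ^ (32 - k)) % 4294967296 = pvF k m := by
  rw [pvF_eq k (by omega) m h0]
  have hPQ : (2 : Int) ^ k * 2 ^ (32 - k) = 4294967296 := by
    rw [← pow_add, show k + (32 - k) = 32 by omega]; norm_num
  have hP : (0 : Int) < 2 ^ k := by positivity
  have hQ : (0 : Int) < 2 ^ (32 - k) := by positivity
  have hd := Int.mul_ediv_add_emod m (2 ^ (32 - k))
  have hr0 : 0 ≤ m % 2 ^ (32 - k) := Int.emod_nonneg m (by omega)
  have hrQ : m % 2 ^ (32 - k) < 2 ^ (32 - k) := Int.emod_lt_of_pos m hQ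
  have hq0 : 0 ≤ m / 2 ^ (32 - k) := Int.ediv_nonneg h0 (by omega)
  have hqP : m / 2 ^ (32 - k) < 2 ^ k := by
    rw [Int.ediv_lt_iff_lt_mul hQ]; nlinarith
  have hw0 : 0 ≤ m % 2 ^ (32 - k) * 2 ^ k + m / 2 ^ (32 - k) := by nlinarith
  have hwlt : m % 2 ^ (32 - k) * 2 ^ k + m / 2 ^ (32 - k) < 4294967296 := by nlinarith
  have ht : m % 2 ^ (32 - k) * 2 ^ k + m / 2 ^ (32 - k) + 4294967296 * (m / 2 ^ (32 - k))
      = m * 2 ^ k + m / 2 ^ (32 - k) := by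
    rw [← hPQ]; linear_combination (2 : Int) ^ k * hd
  exact ((Int.ediv_emod_unique (a := m * 2 ^ k + m / 2 ^ (32 - k)) (b := 4294967296)
    (r := m % 2 ^ (32 - k) * 2 ^ k + m / 2 ^ (32 - k)) (q := m / 2 ^ (32 - k))
    (by norm_num : (0:Int) < 4294967296)).mpr ⟨by linarith [ht], hw0, hwlt⟩).2

lemma leftrotate_eq_iterate (num offset : Int) :
    leftrotate num offset = leftrot^[offset.toNat] num := by
  unfold leftrotate
  rw [List.foldl_const, PySem.List.length_pyRange_one]
  norm_num

-- ===== VERDICT (by name: the statement is the Claim_ definition above) =====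
theorem leftrotate_spec : Claim_unchanged_leftrotate := by
  intro num offset hdom hnd
  by_cases hoff : offset ≤ 0
  · unfold leftrotate leftrotate_alt
    rw [PySem.List.pyRange_one_eq_nil (by omega), if_pos hoff]
    rfl
  · have hop : 1 ≤ offset := by omega
    have hnn : 0 ≤ num := by
      by_contra h
      exact hnd (show D_leftrotate num offset from ⟨by omega, hop⟩)
    have hlt : num < 4294967296 := by
      unfold Dom_leftrotate pvDomInt at hdom
      simp at hdom
      omega
    have hkb : offset.toNat % 32 < 32 := Nat.mod_lt _ (by norm_num)
    rw [leftrotate_eq_iterate, pvF_iter offset.toNat num hnn hlt]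
    unfold leftrotate_alt
    rw [if_neg hoff]
    have hw : PySem.Int.mod num 4294967296 = num := by
      rw [PySem.Int.mod_eq_emod_of_pos (by norm_num)]; omega
    have hk : PySem.Int.mod offset 32 = ((offset.toNat % 32 : Nat) : Int) := by
      rw [PySem.Int.mod_eq_emod_of_pos (by norm_num)]; omega
    rw [PySem.Int.mod_eq_emod_of_pos (by norm_num), PySem.Int.floordiv_eq_ediv_of_pos ?hpos, hw, hk]
    case hpos =>
      rw [hk, Int.shiftLeft_eq]; positivity
    rw [show (((offset.toNat % 32 : Nat) : Int)).toNat = offset.toNat % 32 by omega,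
        show ((32 : Int) - ((offset.toNat % 32 : Nat) : Int)).toNat = 32 - offset.toNat % 32 by omega,
        Int.shiftLeft_eq, Int.shiftLeft_eq, one_mul, one_mul]
    exact (pvB_closed (offset.toNat % 32) hkb num hnn hlt).symm

theorem leftrotate_changed : Claim_changed_leftrotate := by unfold Claim_changed_leftrotate; decide
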